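-- pv_equiv track=rewrite | github.com/Hunter954/CaveiraAtacado | app/admin/routes.py | _parse_flavors
-- ===== SOURCE A (Python) =====
-- def _parse_flavors(raw_value):
--     unique_flavors = []
--     seen = set()
--     for chunk in (raw_value or '').replace('\r', '\n').split('\n'):
--         for item in chunk.split(','):
--             flavor = item.strip()
--             if not flavor:
--                 continue
--             normalized = flavor.casefold()
--             if normalized in seen:
--                 continue
--             seen.add(normalized)
--             unique_flavors.append(flavor)
--     return unique_flavors
-- ===== SOURCE B (Python) =====
-- def _parse_flavors(raw_value):
--     # Single character-level scan: no split/replace/strip calls. Tokens are built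
--     # by hand; whitespace is buffered so leading/trailing whitespace never enters
--     # a token (= strip), and separators flush the current token through the dedup.
--     unique_flavors = []
--     seen = set()
--     cur = []    # characters of the current token, stripped on the fly
--     pend = []   # run of interior whitespace not yet known to be trailing
--
--     def flush():
--         if cur:
--             flavor = ''.join(cur)
--             key = flavor.casefold()
--             if key not in seen:
--                 seen.add(key)
--                 unique_flavors.append(flavor)
--             cur.clear()
--         pend.clear()
--
--     for ch in (raw_value or ''):
--         if ch in '\r\n,':
--             flush()
--         elif ch.isspace():
--             if cur:
--                 pend.append(ch)
--         else:
--             cur.extend(pend)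
--             pend.clear()
--             cur.append(ch)
--     flush()
--     return unique_flavors
-- ===== Notes on version B (the rewrite author's own statement) =====
-- stated objective: alternative
-- what changed: B replaces A's replace/split/split/strip pipeline by a single character-level scanner that builds each token by hand with a pending-whitespace buffer (on-the-fly strip) and flushes through the casefolded dedup set at each separator, so no string-splitting or stripping primitive is called at all.
import Mathlib
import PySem

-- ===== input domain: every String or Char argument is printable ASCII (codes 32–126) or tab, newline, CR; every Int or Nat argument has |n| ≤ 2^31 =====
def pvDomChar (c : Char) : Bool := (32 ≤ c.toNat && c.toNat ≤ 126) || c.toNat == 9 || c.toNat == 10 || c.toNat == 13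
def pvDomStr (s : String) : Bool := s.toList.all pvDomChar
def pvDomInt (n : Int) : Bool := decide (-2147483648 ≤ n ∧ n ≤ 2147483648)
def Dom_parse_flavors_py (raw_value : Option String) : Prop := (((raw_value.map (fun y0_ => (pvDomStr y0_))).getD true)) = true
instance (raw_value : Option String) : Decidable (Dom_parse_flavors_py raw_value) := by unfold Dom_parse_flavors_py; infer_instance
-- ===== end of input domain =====

-- B scraps A's replace/split/split/strip pipeline for a single character-level scanner
-- (hand-built tokens, pending-whitespace buffer for on-the-fly strip, flush at separators);
-- objective: alternative (same cost, different algorithm).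


-- ===== PORT A =====
-- Python's s.split(sep) for a NONEMPTY literal sep (exact: PySem.Chars.splitOn is the sep ≠ "" form).
def pfSplit (s : String) (sep : String) : List String :=
  (PySem.Chars.splitOn s.toList sep.toList).map String.ofList

-- the body of A's inner loop ('casefold' ported as PySem.Str.lower — identical on
-- the ASCII domain these theorems are about)
def pfStepA (st : List String × PySem.Set String) (item : String) :
    List String × PySem.Set String :=
  let flavor := PySem.Str.strip item
  if flavor = "" then st
  else
    let normalized := PySem.Str.lower flavor
    if PySem.Set.contains st.2 normalized then st
    else (st.1 ++ [flavor], PySem.Set.add st.2 normalized)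

def parse_flavors_py (raw_value : Option String) : List String :=
  ((pfSplit (PySem.Str.replace (raw_value.getD "") "\r" "\n") "\n").foldl
    (fun st chunk => (pfSplit chunk ",").foldl pfStepA st)
    ([], PySem.Set.empty)).1

-- ===== PORT B =====
-- B's state: ((unique_flavors, seen), cur, pend). flush(): emit cur through the dedup
-- ('casefold' as PySem.Str.lower, as on the A side), clear cur and pend.
def pfFlush (st : (List String × PySem.Set String) × List Char × List Char) :
    (List String × PySem.Set String) × List Char × List Char :=
  if st.2.1 = [] then (st.1, [], [])
  else
    let flavor := String.ofList st.2.1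
    let key := PySem.Str.lower flavor
    if PySem.Set.contains st.1.2 key then (st.1, [], [])
    else ((st.1.1 ++ [flavor], PySem.Set.add st.1.2 key), [], [])

-- one character of B's scan ("ch in '\r\n,'" ported by hand as the three-way
-- comparison — exact; whitespace test is Python's ch.isspace(), PySem.Chars.isspace)
def pfStepC (st : (List String × PySem.Set String) × List Char × List Char) (ch : Char) :
    (List String × PySem.Set String) × List Char × List Char :=
  if ch = '\r' ∨ ch = '\n' ∨ ch = ',' then pfFlush st
  else if PySem.Chars.isspace ch then
    if st.2.1 ≠ [] then (st.1, st.2.1, st.2.2 ++ [ch]) else st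
  else (st.1, st.2.1 ++ st.2.2 ++ [ch], [])

def parse_flavors_py_alt (raw_value : Option String) : List String :=
  (pfFlush ((raw_value.getD "").toList.foldl pfStepC (([], PySem.Set.empty), [], []))).1.1

-- ===== PRECONDITION & SPEC =====
def Spec_parse_flavors_py (raw_value : Option String) (out : List String) : Prop := out = parse_flavors_py_alt raw_value
instance (raw_value : Option String) (out : List String) : Decidable (Spec_parse_flavors_py raw_value out) := by unfold Spec_parse_flavors_py; infer_instance

-- ===== CLAIM (what is proved, stated in full; the proofs are below) =====
def Claim_equal_parse_flavors_py : Prop := ∀ (raw_value : Option String), Dom_parse_flavors_py raw_value → Spec_parse_flavors_py raw_value (parse_flavors_py raw_value)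

-- ===== LEMMAS AND PROOFS =====

-- reference single-character splitter used to relate the tokenizations
def splitCh (c : Char) : List Char → List (List Char)
  | [] => [[]]
  | x :: xs => if x = c then [] :: splitCh c xs else (splitCh c xs).modifyHead (x :: ·)

theorem splitCh_ne_nil (c : Char) (l : List Char) : splitCh c l ≠ [] := by
  induction l with
  | nil => simp [splitCh]
  | cons x xs ih =>
    simp only [splitCh]
    split
    · simp
    · cases h : splitCh c xs with
      | nil => exact absurd h ih
      | cons a t => simp

theorem replace_go_single (a b : Char) (cs : List Char) : ∀ (fuel : Nat) (acc : List Char),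
    cs.length ≤ fuel →
    PySem.Chars.replace.go [a] [b] fuel cs acc = acc.reverse ++ cs.map (fun c => if c = a then b else c) := by
  induction cs with
  | nil => intro fuel acc _; cases fuel <;> simp [PySem.Chars.replace.go]
  | cons x xs ih =>
    intro fuel acc hle
    cases fuel with
    | zero => simp at hle
    | succ f =>
      rw [PySem.Chars.replace.go]
      by_cases hx : a = x
      · subst hx
        simp only [List.isPrefixOf, BEq.rfl, Bool.true_and, if_true,
          List.length_cons, List.length_nil, List.drop_succ_cons, List.drop_zero]
        rw [ih f _ (by simpa using hle)]
        simp
      · have : ([a].isPrefixOf (x :: xs)) = false := by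
          simp [List.isPrefixOf, hx]
        rw [this]
        simp only [Bool.false_eq_true, if_false]
        rw [ih f _ (by simpa using hle)]
        simp [Ne.symm hx]

theorem replace_single (a b : Char) (cs : List Char) :
    PySem.Chars.replace cs [a] [b] = cs.map (fun c => if c = a then b else c) := by
  rw [PySem.Chars.replace]
  simp only [List.isEmpty_cons, Bool.false_eq_true, if_false]
  rw [replace_go_single a b cs cs.length [] (le_refl _)]
  simp

theorem modHead_id (l : List (List Char)) : List.modifyHead (fun x : List Char => x) l = l := by
  cases l <;> simp

theorem splitOn_go_single (c : Char) (cs : List Char) : ∀ (fuel : Nat) (cur : List Char) (acc : List (List Char)),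
    cs.length ≤ fuel →
    PySem.Chars.splitOn.go [c] fuel cs cur acc
      = acc.reverse ++ (splitCh c cs).modifyHead (cur.reverse ++ ·) := by
  induction cs with
  | nil => intro fuel cur acc _; cases fuel <;> simp [PySem.Chars.splitOn.go, splitCh]
  | cons x xs ih =>
    intro fuel cur acc hle
    cases fuel with
    | zero => simp at hle
    | succ f =>
      rw [PySem.Chars.splitOn.go]
      by_cases hx : c = x
      · subst hx
        simp only [List.isPrefixOf, BEq.rfl, Bool.true_and, if_true,
          List.length_cons, List.length_nil, List.drop_succ_cons, List.drop_zero]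
        rw [ih f _ _ (by simpa using hle)]
        simp [splitCh, modHead_id]
      · have hpre : ([c].isPrefixOf (x :: xs)) = false := by simp [List.isPrefixOf, hx]
        rw [hpre]
        simp only [Bool.false_eq_true, if_false]
        rw [ih f _ _ (by simpa using hle)]
        obtain ⟨h, t, hht⟩ : ∃ h t, splitCh c xs = h :: t := by
          cases hs : splitCh c xs with
          | nil => exact absurd hs (splitCh_ne_nil c xs)
          | cons h t => exact ⟨h, t, rfl⟩
        simp [splitCh, Ne.symm hx, hht]

theorem splitOn_single (c : Char) (cs : List Char) :
    PySem.Chars.splitOn cs [c] = splitCh c cs := by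
  rw [PySem.Chars.splitOn, splitOn_go_single c cs (cs.length + 1) [] [] (by omega)]
  simp [modHead_id]

-- the common reference splitter: tokens between any of the three separators
def splitSep : List Char → List (List Char)
  | [] => [[]]
  | x :: xs => if x = '\r' ∨ x = '\n' ∨ x = ',' then [] :: splitSep xs
               else (splitSep xs).modifyHead (x :: ·)

theorem splitSep_ne_nil (l : List Char) : splitSep l ≠ [] := by
  induction l with
  | nil => simp [splitSep]
  | cons x xs ih =>
    simp only [splitSep]
    split
    · simp
    · cases h : splitSep xs with
      | nil => exact absurd h ih
      | cons a t => simp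

-- A's flat token list (replace '\r'→'\n', split '\n', then each chunk on ',')
-- IS the three-separator split
theorem flat_eq_splitSep (cs : List Char) :
    (splitCh '\n' (cs.map (fun c => if c = '\r' then '\n' else c))).flatMap (splitCh ',')
      = splitSep cs := by
  induction cs with
  | nil => simp [splitCh, splitSep]
  | cons x xs ih =>
    obtain ⟨h, t, hht⟩ : ∃ h t, splitCh '\n' (xs.map (fun c => if c = '\r' then '\n' else c)) = h :: t := by
      cases hs : splitCh '\n' (xs.map (fun c => if c = '\r' then '\n' else c)) with
      | nil => exact absurd hs (splitCh_ne_nil _ _)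
      | cons h t => exact ⟨h, t, rfl⟩
    by_cases hr : x = '\r' ∨ x = '\n'
    · have l1 : splitCh '\n' ((x :: xs).map (fun c => if c = '\r' then '\n' else c))
          = [] :: splitCh '\n' (xs.map (fun c => if c = '\r' then '\n' else c)) := by
        rcases hr with hr | hr <;> subst hr <;> simp [splitCh]
      rw [l1, List.flatMap_cons, ih]
      have : splitSep (x :: xs) = [] :: splitSep xs := by
        simp only [splitSep]; rw [if_pos (by tauto)]
      rw [this]
      simp [splitCh]
    · rw [not_or] at hr
      have l1 : splitCh '\n' ((x :: xs).map (fun c => if c = '\r' then '\n' else c))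
          = (x :: h) :: t := by
        simp only [List.map_cons, if_neg hr.1]
        simp [splitCh, hr.2, hht]
      by_cases hc : x = ','
      · subst hc
        rw [l1, List.flatMap_cons]
        have l2 : splitCh ',' (',' :: h) = [] :: splitCh ',' h := by simp [splitCh]
        rw [l2]
        have l3 : splitSep (',' :: xs) = [] :: splitSep xs := by
          simp only [splitSep]; rw [if_pos (by tauto)]
        rw [l3, ← ih, hht, List.flatMap_cons]
        simp
      · obtain ⟨h2, t2, hht2⟩ : ∃ h2 t2, splitCh ',' h = h2 :: t2 := by
          cases hs : splitCh ',' h with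
          | nil => exact absurd hs (splitCh_ne_nil _ h)
          | cons h2 t2 => exact ⟨h2, t2, rfl⟩
        rw [l1, List.flatMap_cons]
        have l2 : splitCh ',' (x :: h) = (x :: h2) :: t2 := by
          simp [splitCh, hc, hht2]
        rw [l2]
        have l3 : splitSep (x :: xs) = (splitSep xs).modifyHead (x :: ·) := by
          simp only [splitSep]; rw [if_neg (by tauto)]
        rw [l3, ← ih, hht, List.flatMap_cons, hht2]
        simp

-- the common dedup step on an ALREADY-STRIPPED token (as a char list)
def pfStepS (st : List String × PySem.Set String) (flavor : List Char) :
    List String × PySem.Set String :=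
  if flavor = [] then st
  else
    let key := String.ofList (PySem.Chars.lower flavor)
    if PySem.Set.contains st.2 key then st
    else (st.1 ++ [String.ofList flavor], PySem.Set.add st.2 key)

theorem pfStepA_eq_stepS (st : List String × PySem.Set String) (item : String) :
    pfStepA st item = pfStepS st (PySem.Chars.strip item.toList) := by
  unfold pfStepA pfStepS
  have h1 : PySem.Str.strip item = String.ofList (PySem.Chars.strip item.toList) := rfl
  rw [h1]
  by_cases h : PySem.Chars.strip item.toList = []
  · simp [h]
  · rw [if_neg (by simpa using h), if_neg h]
    simp only [PySem.Str.lower]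
    have he : (String.ofList (PySem.Chars.strip item.toList)).toList
        = PySem.Chars.strip item.toList := by simp
    rw [he]

theorem pfFlush_eq_stepS (st : List String × PySem.Set String) (cur pend : List Char) :
    pfFlush (st, cur, pend) = (pfStepS st cur, [], []) := by
  unfold pfFlush pfStepS
  by_cases h : cur = []
  · simp [h]
  · rw [if_neg h, if_neg h]
    simp only [PySem.Str.lower]
    have he : (String.ofList cur).toList = cur := by simp
    rw [he]
    split_ifs <;> rfl

-- == whitespace bookkeeping for the scanner ==

theorem rstrip_append_ws (cur pend : List Char)
    (hc : PySem.Chars.rstrip cur = cur) (hp : pend.all PySem.Chars.isspace = true) :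
    PySem.Chars.rstrip (cur ++ pend) = cur := by
  unfold PySem.Chars.rstrip at *
  rw [List.reverse_append, List.dropWhile_append]
  have : List.dropWhile PySem.Chars.isspace pend.reverse = [] := by
    rw [List.dropWhile_eq_nil_iff]
    intro x hx
    exact List.all_eq_true.mp hp x (List.mem_reverse.mp hx)
  simp [this, hc]

theorem strip_cons_ws (c : Char) (t : List Char) (hc : PySem.Chars.isspace c = true) :
    PySem.Chars.strip (c :: t) = PySem.Chars.strip t := by
  unfold PySem.Chars.strip PySem.Chars.lstrip
  rw [List.dropWhile_cons_of_pos hc]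

theorem strip_cons_nonws (c : Char) (t : List Char) (hc : PySem.Chars.isspace c = false) :
    PySem.Chars.strip (c :: t) = PySem.Chars.rstrip (c :: t) := by
  unfold PySem.Chars.strip PySem.Chars.lstrip
  rw [List.dropWhile_cons_of_neg (by simp [hc])]

theorem lstrip_ext (cur pend : List Char) (ch : Char)
    (hl : PySem.Chars.lstrip cur = cur) (hcur : cur = [] → pend = [])
    (hch : PySem.Chars.isspace ch = false) :
    PySem.Chars.lstrip (cur ++ pend ++ [ch]) = cur ++ pend ++ [ch] := by
  unfold PySem.Chars.lstrip at *
  cases hc : cur with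
  | nil =>
    rw [hcur hc]
    simp [List.dropWhile_cons_of_neg, hch]
  | cons a as =>
    rw [List.append_assoc, List.dropWhile_append]
    rw [← hc, hl]
    have : cur.isEmpty = false := by rw [hc]; rfl
    simp [this]
  
theorem rstrip_ext (cur pend : List Char) (ch : Char)
    (hch : PySem.Chars.isspace ch = false) :
    PySem.Chars.rstrip (cur ++ pend ++ [ch]) = cur ++ pend ++ [ch] := by
  unfold PySem.Chars.rstrip
  rw [List.reverse_append, List.reverse_append]
  simp only [List.reverse_cons, List.reverse_nil, List.nil_append, List.cons_append]
  rw [List.dropWhile_cons_of_neg (by simp [hch])]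
  simp

-- the first (partial) token of the remaining input, then plain strips
def headStrip (cur pend : List Char) : List (List Char) → List (List Char)
  | [] => []
  | t :: ts => (if cur = [] then PySem.Chars.strip t
                else PySem.Chars.rstrip (cur ++ pend ++ t)) :: ts.map PySem.Chars.strip

theorem headStrip_nil_nil (L : List (List Char)) (h : L ≠ []) :
    headStrip [] [] L = L.map PySem.Chars.strip := by
  cases L with
  | nil => exact absurd rfl h
  | cons t ts => simp [headStrip]

-- the scanner invariant: flushing after the rest of the scan computes the same
-- fold of pfStepS over the stripped tokens
theorem fsm_main : ∀ (cs : List Char) (st : List String × PySem.Set String) (cur pend : List Char),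
    (cur = [] → pend = []) → pend.all PySem.Chars.isspace = true →
    PySem.Chars.lstrip cur = cur → PySem.Chars.rstrip cur = cur →
    (pfFlush (cs.foldl pfStepC (st, cur, pend))).1
      = List.foldl pfStepS st (headStrip cur pend (splitSep cs)) := by
  intro cs
  induction cs with
  | nil =>
    intro st cur pend h0 hp hl hr
    simp only [List.foldl_nil, pfFlush_eq_stepS, splitSep, headStrip]
    by_cases hc : cur = []
    · simp [hc, PySem.Chars.strip, PySem.Chars.lstrip, PySem.Chars.rstrip]
    · rw [if_neg hc, List.append_nil, rstrip_append_ws cur pend hr hp]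
      simp
  | cons ch rest ih =>
    intro st cur pend h0 hp hl hr
    by_cases hsep : ch = '\r' ∨ ch = '\n' ∨ ch = ','
    · have l1 : splitSep (ch :: rest) = [] :: splitSep rest := by
        simp only [splitSep]; rw [if_pos hsep]
      have hst : pfStepC (st, cur, pend) ch = (pfStepS st cur, [], []) := by
        unfold pfStepC; rw [if_pos hsep, pfFlush_eq_stepS]
      rw [l1, List.foldl_cons, hst,
          ih (pfStepS st cur) [] [] (fun _ => rfl) rfl rfl rfl,
          headStrip_nil_nil _ (splitSep_ne_nil rest)]
      simp only [headStrip]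
      by_cases hc : cur = []
      · simp [hc, pfStepS, PySem.Chars.strip, PySem.Chars.lstrip, PySem.Chars.rstrip]
      · rw [if_neg hc, List.append_nil, rstrip_append_ws cur pend hr hp]
        simp
    · obtain ⟨h, t, hht⟩ : ∃ h t, splitSep rest = h :: t := by
        cases hs : splitSep rest with
        | nil => exact absurd hs (splitSep_ne_nil rest)
        | cons a b => exact ⟨a, b, rfl⟩
      have l1 : splitSep (ch :: rest) = (ch :: h) :: t := by
        simp only [splitSep]; rw [if_neg hsep, hht]; rfl
      by_cases hws : PySem.Chars.isspace ch = true
      · -- whitespace character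
        by_cases hc : cur = []
        · have hstep : pfStepC (st, cur, pend) ch = (st, cur, pend) := by
            unfold pfStepC
            rw [if_neg hsep, if_pos hws]
            simp [hc]
          simp only [List.foldl_cons, hstep]
          rw [ih st cur pend h0 hp hl hr, l1, hht]
          simp [headStrip, hc, strip_cons_ws ch h hws]
        · have hstep : pfStepC (st, cur, pend) ch = (st, cur, pend ++ [ch]) := by
            unfold pfStepC
            rw [if_neg hsep, if_pos hws]
            simp [hc]
          simp only [List.foldl_cons, hstep]
          rw [ih st cur (pend ++ [ch]) (fun hx => absurd hx hc)
                (by simp_all) hl hr, l1, hht]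
          simp only [headStrip, if_neg hc]
          have : cur ++ (pend ++ [ch]) ++ h = cur ++ pend ++ (ch :: h) := by simp
          rw [this]
      · -- ordinary character
        have hws' : PySem.Chars.isspace ch = false := by simpa using hws
        have hstep : pfStepC (st, cur, pend) ch = (st, cur ++ pend ++ [ch], []) := by
          unfold pfStepC
          rw [if_neg hsep, if_neg (by simp [hws'])]
        have hne : cur ++ pend ++ [ch] ≠ [] := by simp
        simp only [List.foldl_cons, hstep]
        rw [ih st (cur ++ pend ++ [ch]) [] (fun hx => absurd hx hne) rfl
              (lstrip_ext cur pend ch hl h0 hws') (rstrip_ext cur pend ch hws'),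
            l1, hht]
        simp only [headStrip, if_neg hne]
        by_cases hc : cur = []
        · rw [if_pos hc, hc, h0 hc, strip_cons_nonws ch h hws']
          simp
        · rw [if_neg hc]
          have : cur ++ pend ++ [ch] ++ [] ++ h = cur ++ pend ++ (ch :: h) := by simp
          rw [this]

-- A reduces to the same fold over the stripped three-separator tokens
theorem a_chain (s : String) :
    parse_flavors_py (some s)
      = (List.foldl pfStepS ([], PySem.Set.empty)
          ((splitSep s.toList).map PySem.Chars.strip)).1 := by
  unfold parse_flavors_py pfSplit
  simp only [Option.getD_some]
  have hrep : (PySem.Str.replace s "\r" "\n").toList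
      = s.toList.map (fun c => if c = '\r' then '\n' else c) := by
    rw [PySem.Str.toList_replace]
    exact replace_single '\r' '\n' s.toList
  rw [hrep, show ("\n".toList = ['\n']) from rfl, splitOn_single]
  rw [List.foldl_map]
  have inner : ∀ (st : List String × PySem.Set String) (l : List Char),
      ((PySem.Chars.splitOn (String.ofList l).toList ",".toList).map String.ofList).foldl pfStepA st
        = List.foldl (fun st t => pfStepS st (PySem.Chars.strip t)) st (splitCh ',' l) := by
    intro st l
    rw [show ((String.ofList l).toList = l) from by simp,
        show (",".toList = [',']) from rfl, splitOn_single, List.foldl_map]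
    have hfun : (fun (st : List String × PySem.Set String) (t : List Char) =>
        pfStepA st (String.ofList t)) = (fun st t => pfStepS st (PySem.Chars.strip t)) := by
      funext st t
      rw [pfStepA_eq_stepS]
      congr 1
      simp
    rw [hfun]
  simp only [inner]
  rw [← List.foldl_flatMap, flat_eq_splitSep, ← List.foldl_map]

-- ===== VERDICT (by name: the statement is the Claim_ definition above) =====
theorem parse_flavors_py_spec : Claim_equal_parse_flavors_py := by
  intro raw_value _
  show parse_flavors_py raw_value = parse_flavors_py_alt raw_value
  have key : ∀ (s : String), parse_flavors_py (some s) = parse_flavors_py_alt (some s) := by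
    intro s
    rw [a_chain]
    unfold parse_flavors_py_alt
    simp only [Option.getD_some]
    rw [fsm_main s.toList ([], PySem.Set.empty) [] [] (fun _ => rfl) rfl rfl rfl]
    rw [headStrip_nil_nil _ (splitSep_ne_nil s.toList)]
  cases raw_value with
  | none =>
    show parse_flavors_py none = parse_flavors_py_alt none
    have h1 : parse_flavors_py none = parse_flavors_py (some "") := rfl
    have h2 : parse_flavors_py_alt none = parse_flavors_py_alt (some "") := rfl
    rw [h1, h2]; exact key ""
  | some s => exact key s
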